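-- pv_equiv track=rewrite | github.com/vickscosta/pythons | king/king.py | calcula_maior_carta_menor_mesa_especial
-- ===== SOURCE A (Python) =====
-- def calcula_maior_carta_menor_mesa_especial(cartas,vaza):
--
--     melhor_carta=cartas[0]
--     if len(vaza)==0:
--         return melhor_carta
--
--     if len(vaza)==3:
--         sempre_mau=True
--         for carta in cartas:
--             for carta_outro_jogador in vaza:
--                 if carta[1]>=melhor_carta[1] and carta[1]<carta_outro_jogador[1]:
--                     melhor_carta=carta
--                     sempre_mau=False
--
--         if sempre_mau==True:
--             for carta in cartas:
--                 if carta[1]>=melhor_carta[1]: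
--                     melhor_carta=carta
--     else:
--         for carta in cartas:
--             for carta_outro_jogador in vaza:
--                 if carta[1]>=melhor_carta[1] and carta[1]<carta_outro_jogador[1]:
--                     melhor_carta=carta
--
--     return melhor_carta
-- ===== SOURCE B (Python) =====
-- def calcula_maior_carta_menor_mesa_especial(cartas, vaza):
--     melhor_carta = cartas[0]
--     if len(vaza) == 0:
--         return melhor_carta
--     mesa_max = max(v[1] for v in vaza)
--     candidatos = [c for c in cartas if melhor_carta[1] <= c[1] < mesa_max]
--     if candidatos:
--         # max keeps the first maximum; over the reversed list that is the
--         # last card of maximal value, matching the >= tie-break of a scan.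
--         return max(reversed(candidatos), key=lambda c: c[1])
--     if len(vaza) == 3:
--         return max(reversed(cartas), key=lambda c: c[1])
--     return melhor_carta
-- ===== Notes on version B (the rewrite author's own statement) =====
-- stated objective: faster
-- what changed: B replaces A's nested stateful scans (cartas x vaza, with a sempre_mau flag) by: precompute the table maximum, filter cartas once into the candidates below it, and pick the last card of maximal value via max over the reversed list (same for the len(vaza)==3 fallback); Pre_ excludes empty cartas, where both raise IndexError.
import Mathlib
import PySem

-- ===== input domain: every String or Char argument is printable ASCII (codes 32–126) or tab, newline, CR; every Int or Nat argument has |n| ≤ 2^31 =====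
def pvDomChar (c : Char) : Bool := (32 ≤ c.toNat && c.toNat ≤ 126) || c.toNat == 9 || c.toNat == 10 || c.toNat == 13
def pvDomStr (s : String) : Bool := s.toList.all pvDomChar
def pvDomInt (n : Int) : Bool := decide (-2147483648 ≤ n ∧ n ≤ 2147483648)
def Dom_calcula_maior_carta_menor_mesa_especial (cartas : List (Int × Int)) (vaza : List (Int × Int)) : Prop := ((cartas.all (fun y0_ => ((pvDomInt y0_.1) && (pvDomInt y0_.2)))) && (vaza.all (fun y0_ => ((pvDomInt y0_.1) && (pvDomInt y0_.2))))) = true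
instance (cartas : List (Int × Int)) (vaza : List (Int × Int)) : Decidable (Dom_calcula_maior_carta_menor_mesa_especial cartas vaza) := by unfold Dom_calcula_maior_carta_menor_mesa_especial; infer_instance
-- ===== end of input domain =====

-- B replaces A's nested stateful scans by filter + last-argmax over the reversed candidate list (a different algorithm).


-- ===== PORT A =====
def calcula_maior_carta_menor_mesa_especial (cartas : List (Int × Int)) (vaza : List (Int × Int)) : Int × Int :=
  match cartas with
  | [] => (0, 0)   -- cartas[0] raises IndexError in Python; excluded by Pre_
  | c0 :: _ =>
    if vaza.length = 0 then c0
    else if vaza.length = 3 then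
      -- state: (melhor_carta, sempre_mau)
      let st := cartas.foldl (fun (st : (Int × Int) × Bool) carta =>
        vaza.foldl (fun (st : (Int × Int) × Bool) v =>
          if carta.2 ≥ st.1.2 ∧ carta.2 < v.2 then (carta, false) else st) st) (c0, true)
      if st.2 = true then
        cartas.foldl (fun m carta => if carta.2 ≥ m.2 then carta else m) st.1
      else st.1
    else
      cartas.foldl (fun m carta =>
        vaza.foldl (fun m v =>
          if carta.2 ≥ m.2 ∧ carta.2 < v.2 then carta else m) m) c0

-- ===== PORT B =====
def calcula_maior_carta_menor_mesa_especial_alt (cartas : List (Int × Int)) (vaza : List (Int × Int)) : Int × Int :=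
  match cartas with
  | [] => (0, 0)   -- cartas[0] raises IndexError in Python; excluded by Pre_
  | c0 :: _ =>
    if vaza.length = 0 then c0
    else
      -- mesa_max = max(v[1] for v in vaza); vaza is nonempty here, so getD's default is never used
      let mesaMax := (PySem.List.max? (vaza.map (fun v => v.2)) (fun y => y)).getD 0
      let candidatos := cartas.filter (fun c => decide (c0.2 ≤ c.2) && decide (c.2 < mesaMax))
      if candidatos ≠ [] then
        -- max(reversed(candidatos), key=...): last card of maximal value; getD default unused
        (PySem.List.max? candidatos.reverse (fun c => c.2)).getD (0, 0)
      else if vaza.length = 3 then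
        (PySem.List.max? cartas.reverse (fun c => c.2)).getD (0, 0)
      else c0

-- ===== PRECONDITION & SPEC =====
-- Pre_ excludes exactly empty cartas, on which Python A raises IndexError at cartas[0].
def Pre_calcula_maior_carta_menor_mesa_especial (cartas : List (Int × Int)) (vaza : List (Int × Int)) : Prop := cartas ≠ []
instance (cartas : List (Int × Int)) (vaza : List (Int × Int)) : Decidable (Pre_calcula_maior_carta_menor_mesa_especial cartas vaza) := by unfold Pre_calcula_maior_carta_menor_mesa_especial; infer_instance
def pvWitness_calcula_maior_carta_menor_mesa_especial : (List (Int × Int)) × (List (Int × Int)) := ([(1, 5), (2, 3)], [(0, 4), (1, 6), (2, 2)])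

def Spec_calcula_maior_carta_menor_mesa_especial (cartas : List (Int × Int)) (vaza : List (Int × Int)) (out : Int × Int) : Prop := out = calcula_maior_carta_menor_mesa_especial_alt cartas vaza
instance (cartas : List (Int × Int)) (vaza : List (Int × Int)) (out : Int × Int) : Decidable (Spec_calcula_maior_carta_menor_mesa_especial cartas vaza out) := by unfold Spec_calcula_maior_carta_menor_mesa_especial; infer_instance

-- ===== CLAIM (what is proved, stated in full; the proofs are below) =====
def Claim_equal_calcula_maior_carta_menor_mesa_especial : Prop := ∀ (cartas : List (Int × Int)) (vaza : List (Int × Int)), Dom_calcula_maior_carta_menor_mesa_especial cartas vaza → Pre_calcula_maior_carta_menor_mesa_especial cartas vaza → Spec_calcula_maior_carta_menor_mesa_especial cartas vaza (calcula_maior_carta_menor_mesa_especial cartas vaza)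

-- ===== LEMMAS AND PROOFS =====

-- last-argmax of a list: PySem's max? (first maximum) over the reversed list
def tmax (l : List (Int × Int)) : Option (Int × Int) :=
  PySem.List.max? l.reverse (fun c => c.2)

def stepMax (acc : Option (Int × Int)) (x : Int × Int) : Option (Int × Int) :=
  match acc with
  | none => some x
  | some m => if m.2 < x.2 then some x else some m

theorem tmax_unfold (l : List (Int × Int)) : tmax l = l.reverse.foldl stepMax none := by
  unfold tmax PySem.List.max? stepMax
  congr 1
  funext acc x
  cases acc <;> rfl

-- max?'s fold with a some-seed, reduced to the none-seeded fold
theorem maxfold_some (xs : List (Int × Int)) (a : Int × Int) :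
    xs.foldl stepMax (some a)
    = match xs.foldl stepMax none with
      | none => some a
      | some m => if a.2 < m.2 then some m else some a := by
  induction xs generalizing a with
  | nil => rfl
  | cons x xs ih =>
    simp only [List.foldl_cons, stepMax]
    by_cases hax : a.2 < x.2
    · rw [if_pos hax, ih x]
      cases hr : xs.foldl stepMax none with
      | none => simp [hax]
      | some m =>
        dsimp only
        by_cases hxm : x.2 < m.2
        · rw [if_pos hxm]
          all_goals (dsimp only; split_ifs <;> first | rfl | omega)
        · rw [if_neg hxm]
          all_goals (dsimp only; split_ifs <;> first | rfl | omega)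
    · rw [if_neg hax, ih a, ih x]
      cases hr : xs.foldl stepMax none with
      | none => simp [hax]
      | some m =>
        dsimp only
        by_cases hxm : x.2 < m.2
        · rw [if_pos hxm]
          all_goals (dsimp only; split_ifs <;> first | rfl | omega)
        · rw [if_neg hxm]
          all_goals (dsimp only; split_ifs <;> first | rfl | omega)

theorem tmax_snoc (l : List (Int × Int)) (c : Int × Int) :
    tmax (l ++ [c]) = match tmax l with
      | none => some c
      | some b => if c.2 < b.2 then some b else some c := by
  rw [tmax_unfold, tmax_unfold, List.reverse_append]
  simp only [List.reverse_cons, List.reverse_nil, List.nil_append, List.singleton_append,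
    List.foldl_cons]
  show l.reverse.foldl stepMax (some c) = _
  rw [maxfold_some]

theorem tmax_mem {l : List (Int × Int)} {b : Int × Int} (h : tmax l = some b) : b ∈ l := by
  have := PySem.List.max?_mem h
  simpa using this

theorem tmax_none_iff (l : List (Int × Int)) : tmax l = none ↔ l = [] := by
  unfold tmax
  rw [PySem.List.max?_eq_none_iff]
  simp

-- A's pair fold (condition already collapsed to c.2 < M) = last-argmax of the filtered list
theorem main_pair (M : Int) (m0 : Int × Int) (l : List (Int × Int)) :
    l.foldl (fun (st : (Int × Int) × Bool) c =>
      if c.2 ≥ st.1.2 ∧ c.2 < M then (c, false) else st) (m0, true)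
    = match tmax (l.filter (fun c => decide (m0.2 ≤ c.2) && decide (c.2 < M))) with
      | none => (m0, true)
      | some b => (b, false) := by
  induction l using List.reverseRecOn with
  | nil => rfl
  | append_singleton l c ih =>
    rw [List.foldl_append, ih, List.filter_append]
    simp only [List.foldl_cons, List.foldl_nil, List.filter_cons, List.filter_nil]
    cases ht : tmax (l.filter (fun c => decide (m0.2 ≤ c.2) && decide (c.2 < M))) with
    | none =>
      have hnil : l.filter (fun c => decide (m0.2 ≤ c.2) && decide (c.2 < M)) = [] :=
        (tmax_none_iff _).mp ht
      rw [hnil]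
      dsimp only
      by_cases hQ : m0.2 ≤ c.2 ∧ c.2 < M
      · rw [if_pos ⟨hQ.1, hQ.2⟩, if_pos (by simp [hQ.1, hQ.2])]
        rfl
      · rw [if_neg (fun h => hQ ⟨h.1, h.2⟩), if_neg (by simpa using hQ)]
        rfl
    | some b =>
      have hbmem := tmax_mem ht
      have hbQ : m0.2 ≤ b.2 := by
        have := List.of_mem_filter hbmem
        simp at this
        exact this.1
      by_cases h : c.2 ≥ b.2 ∧ c.2 < M
      · rw [if_pos h]
        have hQc : (decide (m0.2 ≤ c.2) && decide (c.2 < M)) = true := by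
          simp
          exact ⟨le_trans hbQ h.1, h.2⟩
        rw [if_pos hQc, tmax_snoc, ht]
        dsimp only
        rw [if_neg (by omega : ¬ c.2 < b.2)]
      · rw [if_neg h]
        by_cases hQ : m0.2 ≤ c.2 ∧ c.2 < M
        · rw [if_pos (by simp [hQ.1, hQ.2]), tmax_snoc, ht]
          dsimp only
          rw [if_pos (by omega : c.2 < b.2)]
        · rw [if_neg (by simpa using hQ)]
          simp [ht]

-- first component of the pair fold = the melhor-only fold
theorem fst_pair (M : Int) (l : List (Int × Int)) (st : (Int × Int) × Bool) :
    (l.foldl (fun (st : (Int × Int) × Bool) c =>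
      if c.2 ≥ st.1.2 ∧ c.2 < M then (c, false) else st) st).1
    = l.foldl (fun m c => if c.2 ≥ m.2 ∧ c.2 < M then c else m) st.1 := by
  induction l generalizing st with
  | nil => rfl
  | cons c cs ih =>
    simp only [List.foldl_cons]
    by_cases h : c.2 ≥ st.1.2 ∧ c.2 < M
    · rw [if_pos h, if_pos h, ih]
    · rw [if_neg h, if_neg h, ih]

-- the unconditioned tie-max fold = last-argmax of seed-then-list
theorem tmax_tie (m : Int × Int) (l : List (Int × Int)) :
    tmax (m :: l) = some (l.foldl (fun m c => if c.2 ≥ m.2 then c else m) m) := by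
  induction l using List.reverseRecOn with
  | nil => rfl
  | append_singleton l c ih =>
    rw [show m :: (l ++ [c]) = (m :: l) ++ [c] from rfl, tmax_snoc, ih, List.foldl_append]
    simp only [List.foldl_cons, List.foldl_nil]
    split_ifs <;> first | rfl | omega

-- A's inner loop over vaza, pair state: collapses to a single existential test.
theorem innerA_pair (c : Int × Int) (vaza : List (Int × Int)) (st : (Int × Int) × Bool) :
    vaza.foldl (fun (st : (Int × Int) × Bool) v =>
      if c.2 ≥ st.1.2 ∧ c.2 < v.2 then (c, false) else st) st
    = if c.2 ≥ st.1.2 ∧ (∃ v ∈ vaza, c.2 < v.2) then (c, false) else st := by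
  induction vaza generalizing st with
  | nil => simp
  | cons v vs ih =>
    simp only [List.foldl_cons, List.mem_cons]
    by_cases h : c.2 ≥ st.1.2 ∧ c.2 < v.2
    · rw [if_pos h, ih]
      have hR : c.2 ≥ st.1.2 ∧ ∃ w ∈ v :: vs, c.2 < w.2 := ⟨h.1, v, by simp, h.2⟩
      rw [if_pos hR]
      split_ifs <;> rfl
    · rw [if_neg h, ih]
      by_cases hge : c.2 ≥ st.1.2
      · have hnv : ¬ c.2 < v.2 := fun hv => h ⟨hge, hv⟩
        refine if_congr ?_ rfl rfl
        simp only [List.mem_cons]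
        constructor
        · rintro ⟨_, x, hx, hlt⟩
          exact ⟨hge, x, Or.inr hx, hlt⟩
        · rintro ⟨_, x, (rfl | hx), hlt⟩
          · exact absurd hlt hnv
          · exact ⟨hge, x, hx, hlt⟩
      · simp [hge]

-- A's inner loop over vaza, melhor-only state.
theorem innerA_m (c : Int × Int) (vaza : List (Int × Int)) (m : Int × Int) :
    vaza.foldl (fun m v =>
      if c.2 ≥ m.2 ∧ c.2 < v.2 then c else m) m
    = if c.2 ≥ m.2 ∧ (∃ v ∈ vaza, c.2 < v.2) then c else m := by
  induction vaza generalizing m with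
  | nil => simp
  | cons v vs ih =>
    simp only [List.foldl_cons, List.mem_cons]
    by_cases h : c.2 ≥ m.2 ∧ c.2 < v.2
    · rw [if_pos h, ih]
      have hR : c.2 ≥ m.2 ∧ ∃ w ∈ v :: vs, c.2 < w.2 := ⟨h.1, v, by simp, h.2⟩
      rw [if_pos hR]
      split_ifs <;> rfl
    · rw [if_neg h, ih]
      by_cases hge : c.2 ≥ m.2
      · have hnv : ¬ c.2 < v.2 := fun hv => h ⟨hge, hv⟩
        refine if_congr ?_ rfl rfl
        simp only [List.mem_cons]
        constructor
        · rintro ⟨_, x, hx, hlt⟩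
          exact ⟨hge, x, Or.inr hx, hlt⟩
        · rintro ⟨_, x, (rfl | hx), hlt⟩
          · exact absurd hlt hnv
          · exact ⟨hge, x, hx, hlt⟩
      · simp [hge]

-- the existential test equals the comparison against the folded maximum
theorem lt_foldl_max (c a : Int) (l : List Int) :
    c < l.foldl max a ↔ (c < a ∨ ∃ x ∈ l, c < x) := by
  induction l generalizing a with
  | nil => simp
  | cons x xs ih =>
    simp only [List.foldl_cons, List.mem_cons, ih, lt_max_iff]
    constructor
    · rintro ((h | h) | ⟨y, hy, h⟩)
      · exact Or.inl h
      · exact Or.inr ⟨x, Or.inl rfl, h⟩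
      · exact Or.inr ⟨y, Or.inr hy, h⟩
    · rintro (h | ⟨y, (rfl | hy), h⟩)
      · exact Or.inl (Or.inl h)
      · exact Or.inl (Or.inr h)
      · exact Or.inr ⟨y, hy, h⟩

-- ===== VERDICT (by name: the statement is the Claim_ definition above) =====
theorem calcula_maior_carta_menor_mesa_especial_spec : Claim_equal_calcula_maior_carta_menor_mesa_especial := by
  intro cartas vaza _ hpre
  unfold Spec_calcula_maior_carta_menor_mesa_especial
  cases cartas with
  | nil => exact absurd rfl hpre
  | cons c0 cs =>
    simp only [calcula_maior_carta_menor_mesa_especial,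
      calcula_maior_carta_menor_mesa_especial_alt]
    cases vaza with
    | nil => simp
    | cons v vs =>
      have h0 : ¬ ((v :: vs).length = 0) := by simp
      rw [if_neg h0, if_neg h0]
      have hmax : (PySem.List.max? ((v :: vs).map (fun w => w.2)) (fun y => y)).getD 0
          = (vs.map (fun w => w.2)).foldl max v.2 := by
        simp [PySem.List.max?_id_cons]
      rw [hmax]
      set M : Int := (vs.map (fun w => w.2)).foldl max v.2 with hM
      have hPiff : ∀ c : Int × Int, (c.2 < M) ↔ (∃ w ∈ v :: vs, c.2 < w.2) := by
        intro c
        simp only [hM, lt_foldl_max, List.mem_map, List.mem_cons]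
        constructor
        · rintro (h | ⟨x, ⟨w, hw, rfl⟩, h⟩)
          · exact ⟨v, Or.inl rfl, h⟩
          · exact ⟨w, Or.inr hw, h⟩
        · rintro ⟨w, (rfl | hw), h⟩
          · exact Or.inl h
          · exact Or.inr ⟨w.2, ⟨w, hw, rfl⟩, h⟩
      set F := (c0 :: cs).filter (fun c => decide (c0.2 ≤ c.2) && decide (c.2 < M)) with hF
      by_cases h3 : (v :: vs).length = 3
      · rw [if_pos h3]
        have hA : ((c0 :: cs).foldl (fun (st : (Int × Int) × Bool) carta =>
            (v :: vs).foldl (fun (st : (Int × Int) × Bool) w =>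
              if carta.2 ≥ st.1.2 ∧ carta.2 < w.2 then (carta, false) else st) st) (c0, true))
          = ((c0 :: cs).foldl (fun (st : (Int × Int) × Bool) carta =>
              if carta.2 ≥ st.1.2 ∧ carta.2 < M then (carta, false) else st) (c0, true)) := by
          apply PySem.List.foldl_congr_mem
          intro st carta _
          rw [innerA_pair]
          exact if_congr (and_congr_right' (hPiff carta).symm) rfl rfl
        rw [hA, main_pair M c0 (c0 :: cs)]
        cases hT : tmax F with
        | none =>
          have hFnil : F = [] := (tmax_none_iff F).mp hT
          dsimp only
          rw [if_neg (not_not_intro hFnil), if_pos h3]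
          have hcc : (if c0.2 ≥ c0.2 then c0 else c0) = c0 := if_pos le_rfl
          have htie := tmax_tie c0 cs
          unfold tmax at htie
          rw [List.foldl_cons, hcc, htie]
          rfl
        | some b =>
          have hne : F ≠ [] := by
            intro h
            rw [h] at hT
            simp [tmax, PySem.List.max?] at hT
          dsimp only
          unfold tmax at hT
          rw [if_pos hne, hT]
          rfl
      · rw [if_neg h3]
        have hA : ((c0 :: cs).foldl (fun m carta =>
            (v :: vs).foldl (fun m w =>
              if carta.2 ≥ m.2 ∧ carta.2 < w.2 then carta else m) m) (c0 : Int × Int))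
          = ((c0 :: cs).foldl (fun m carta =>
              if carta.2 ≥ m.2 ∧ carta.2 < M then carta else m) (c0 : Int × Int)) := by
          apply PySem.List.foldl_congr_mem
          intro m carta _
          rw [innerA_m]
          exact if_congr (and_congr_right' (hPiff carta).symm) rfl rfl
        rw [hA, ← fst_pair M (c0 :: cs) ((c0, true)), main_pair M c0 (c0 :: cs)]
        cases hT : tmax F with
        | none =>
          have hFnil : F = [] := (tmax_none_iff F).mp hT
          dsimp only
          rw [if_neg (not_not_intro hFnil), if_neg h3]
        | some b =>
          have hne : F ≠ [] := by
            intro h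
            rw [h] at hT
            simp [tmax, PySem.List.max?] at hT
          dsimp only
          unfold tmax at hT
          rw [if_pos hne, hT]
          rfl
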